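-- pv_equiv track=rewrite | github.com/Shirmyyy/CS313E | BabyNames.py | morePopular
-- ===== SOURCE A (Python) =====
-- def morePopular(lst):
--     for i in range (len(lst)):
--         if lst[i]==0:
--             lst[i]=1001
--     for i in range (len(lst)-1):
--         if lst[i+1]>=lst[i]:
--             return False
--     return True
-- ===== SOURCE B (Python) =====
-- def morePopular(lst):
--     lst[:] = [1001 if x == 0 else x for x in lst]
--     return lst == sorted(lst, reverse=True) and len(set(lst)) == len(lst)
-- ===== Notes on version B (the rewrite author's own statement) =====
-- stated objective: alternative
-- what changed: Replaces the index-based zero-rewriting loop with a comprehension assigned in place and replaces the adjacent-pair scan with a sort-then-compare check: the list equals its descending sort and has no duplicates iff it is strictly decreasing.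
import Mathlib
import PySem

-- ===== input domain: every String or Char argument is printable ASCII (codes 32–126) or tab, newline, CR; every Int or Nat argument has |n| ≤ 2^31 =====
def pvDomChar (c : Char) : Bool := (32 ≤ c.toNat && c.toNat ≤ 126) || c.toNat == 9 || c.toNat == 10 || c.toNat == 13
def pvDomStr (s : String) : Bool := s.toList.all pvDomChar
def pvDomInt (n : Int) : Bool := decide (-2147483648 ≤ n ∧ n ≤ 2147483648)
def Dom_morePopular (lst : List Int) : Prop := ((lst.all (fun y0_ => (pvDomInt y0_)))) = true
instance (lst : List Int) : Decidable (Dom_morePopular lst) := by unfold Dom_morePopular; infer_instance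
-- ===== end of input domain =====

-- B replaces the adjacent-pair scan with a sort-then-compare check (list equals its
-- descending sort and has no duplicates); the in-place zero→1001 rewriting is preserved
-- identically in both Pythons, and the theorems here are about the RETURN value.
-- ===== PORT A =====
-- first loop of A: rewrite every 0 in place to 1001
def pvFixA : List Int → List Int
  | [] => []
  | x :: t => (if x = 0 then 1001 else x) :: pvFixA t

-- second loop of A: scan adjacent pairs, early-return false on lst[i+1] >= lst[i]
def pvScanA : List Int → Bool
  | x :: y :: t => if y ≥ x then false else pvScanA (y :: t)
  | _ => true

def morePopular (lst : List Int) : Bool :=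
  pvScanA (pvFixA lst)

-- ===== PORT B =====
def morePopular_alt (lst : List Int) : Bool :=
  let m := lst.map (fun x => if x = 0 then 1001 else x)
  decide (m = PySem.List.sorted m (fun x => x) true)
    && ((PySem.Set.ofList m).length == m.length)

-- ===== PRECONDITION & SPEC =====
def Spec_morePopular (lst : List Int) (out : Bool) : Prop := out = morePopular_alt lst
instance (lst : List Int) (out : Bool) : Decidable (Spec_morePopular lst out) := by unfold Spec_morePopular; infer_instance

-- ===== CLAIM (what is proved, stated in full; the proofs are below) =====
def Claim_equal_morePopular : Prop := ∀ (lst : List Int), Dom_morePopular lst → Spec_morePopular lst (morePopular lst)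

-- ===== LEMMAS AND PROOFS =====

-- ===== VERDICT (by name: the statement is the Claim_ definition above) =====


theorem pvFixA_eq_map (lst : List Int) :
    pvFixA lst = lst.map (fun x => if x = 0 then 1001 else x) := by
  induction lst with
  | nil => rfl
  | cons x t ih => simp [pvFixA, ih]

theorem pvScanA_iff_pairwise (m : List Int) :
    pvScanA m = true ↔ List.Pairwise (· > ·) m := by
  rw [← List.isChain_iff_pairwise]
  induction m with
  | nil => simp [pvScanA]
  | cons x t ih =>
    cases t with
    | nil => simp [pvScanA]
    | cons y u =>
      by_cases h : y ≥ x
      · simp [pvScanA, h, List.isChain_cons_cons]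
      · simp [pvScanA, h, List.isChain_cons_cons] at ih ⊢
        constructor
        · intro hs; exact ⟨by omega, ih.mp hs⟩
        · intro hc; exact ih.mpr hc.2

theorem ofList_len_eq_iff (m : List Int) :
    (PySem.Set.ofList m).length = m.length ↔ m.Nodup := by
  constructor
  · intro h
    induction m using List.reverseRecOn with
    | nil => exact List.nodup_nil
    | append_singleton xs x ih =>
      rw [PySem.Set.ofList_append_singleton, PySem.Set.add_eq_ite,
        List.length_append] at h
      by_cases hx : x ∈ PySem.Set.ofList xs
      · rw [if_pos hx] at h
        have := PySem.Set.length_ofList_le (xs := xs)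
        simp at h
        omega
      · rw [if_neg hx, List.length_append] at h
        simp at h
        have hn : xs.Nodup := ih h
        have hxm : x ∉ xs := fun hm => hx ((PySem.Set.mem_ofList xs x).mpr hm)
        rw [List.nodup_append]
        refine ⟨hn, List.nodup_singleton x, ?_⟩
        intro a ha b hb
        rw [List.mem_singleton] at hb
        intro he
        rw [he, hb] at ha
        exact hxm ha
  · intro h
    rw [PySem.Set.ofList_eq_self_of_nodup _ h]

theorem scan_eq_sorted_check (m : List Int) :
    pvScanA m =
      (decide (m = PySem.List.sorted m (fun x => x) true)
        && ((PySem.Set.ofList m).length == m.length)) := by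
  by_cases hs : pvScanA m = true
  · have hp : m.Pairwise (· > ·) := (pvScanA_iff_pairwise m).mp hs
    have hsort : PySem.List.sorted m (fun x => x) true = m :=
      PySem.List.sorted_rev_eq_of_perm_of_pairwise_gt m m (fun x => x)
        (List.Perm.refl m) (hp.imp (fun h => h))
    have hn : m.Nodup := hp.imp (fun h => by omega)
    rw [hs, hsort, (ofList_len_eq_iff m).mpr hn]
    simp
  · rw [Bool.not_eq_true] at hs
    rw [hs]
    by_cases heq : m = PySem.List.sorted m (fun x => x) true
    · by_cases hn : m.Nodup
      · exfalso
        have hge := PySem.List.sorted_pairwise_rev m (fun x => x)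
        rw [← heq] at hge
        have hp : m.Pairwise (· > ·) :=
          (List.Pairwise.and hge hn).imp (fun hab => by
            obtain ⟨h1, h2⟩ := hab; omega)
        have : pvScanA m = true := (pvScanA_iff_pairwise m).mpr hp
        simp [this] at hs
      · have : (PySem.Set.ofList m).length ≠ m.length :=
          fun h => hn ((ofList_len_eq_iff m).mp h)
        simp [this]
    · simp [heq]

theorem morePopular_spec : Claim_equal_morePopular := by
  intro lst _
  unfold Spec_morePopular morePopular morePopular_alt
  rw [pvFixA_eq_map]
  exact scan_eq_sorted_check _
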